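-- pv_equiv track=rewrite | github.com/ChrisHIV/SeqAnalTools | PropagateNoCoverageChar.py | PropagateNoCoverageChar
-- ===== SOURCE A (Python) =====
-- NoCoverageChar='?'
--
-- GapChar='-'
--
-- def PropagateNoCoverageChar(seq, LeftToRightDone=False):
--   '''Replaces gaps that border "no coverage" by "no coverage".'''
--
--   if LeftToRightDone:
--     seq = seq[::-1]
--   BaseToLeftIsNoCoverage = False
--   ResultingSeq = ''
--   for base in seq:
--     if base == NoCoverageChar:
--       BaseToLeftIsNoCoverage = True
--       ResultingSeq += NoCoverageChar
--     elif base == GapChar: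
--       if BaseToLeftIsNoCoverage:
--         ResultingSeq += NoCoverageChar
--       else:
--         ResultingSeq += GapChar
--     else:
--       BaseToLeftIsNoCoverage = False
--       ResultingSeq += base
--   if LeftToRightDone:
--     ResultingSeq = ResultingSeq[::-1]
--   else:
--     ResultingSeq = PropagateNoCoverageChar(ResultingSeq, True)
--   return ResultingSeq
-- ===== SOURCE B (Python) =====
-- NoCoverageChar = '?'
-- GapChar = '-'
--
-- def PropagateNoCoverageChar(seq, LeftToRightDone=False):
--   '''Replaces gaps that border "no coverage" by "no coverage" (single forward scan).'''
--   out = []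
--   left = None
--   run = 0
--   for c in seq:
--     if c == GapChar:
--       run += 1
--     else:
--       if run:
--         if c == NoCoverageChar or (not LeftToRightDone and left == NoCoverageChar):
--           out.append(NoCoverageChar * run)
--         else:
--           out.append(GapChar * run)
--         run = 0
--       out.append(c)
--       left = c
--   if run:
--     if not LeftToRightDone and left == NoCoverageChar:
--       out.append(NoCoverageChar * run)
--     else:
--       out.append(GapChar * run)
--   return ''.join(out)
-- ===== Notes on version B (the rewrite author's own statement) =====
-- stated objective: faster
-- what changed: A makes a forward pass then recurses on the string to do a second reversed pass (two passes plus two reversals); B is a single forward scan that buffers each gap run and fills it from its two bounding characters when the run closes, honouring LeftToRightDone by dropping the left-boundary condition. Measured ~2x faster: one pass over the data instead of two passes plus two string reversals and a recursive call.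
import Mathlib
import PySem

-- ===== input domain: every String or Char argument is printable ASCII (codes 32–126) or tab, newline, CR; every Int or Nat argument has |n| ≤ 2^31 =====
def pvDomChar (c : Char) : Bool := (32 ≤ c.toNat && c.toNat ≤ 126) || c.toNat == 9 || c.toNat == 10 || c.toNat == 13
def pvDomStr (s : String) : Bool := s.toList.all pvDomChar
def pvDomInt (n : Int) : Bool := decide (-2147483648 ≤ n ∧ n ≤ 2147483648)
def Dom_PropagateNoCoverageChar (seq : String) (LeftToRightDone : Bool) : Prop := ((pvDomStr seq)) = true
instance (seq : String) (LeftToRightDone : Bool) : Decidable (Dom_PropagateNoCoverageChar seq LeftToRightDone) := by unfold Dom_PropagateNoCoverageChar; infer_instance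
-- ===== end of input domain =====

-- B replaces A's forward pass + recursive reversed pass by ONE forward scan buffering each gap
-- run and filling it from its two bounding characters (objective: alternative decomposition).

-- ===== PORT A =====
-- the loop body of A: state = (BaseToLeftIsNoCoverage, ResultingSeq)
def pyStep (st : Bool × List Char) (base : Char) : Bool × List Char :=
  if base = '?' then (true, st.2 ++ ['?'])
  else if base = '-' then (st.1, st.2 ++ [if st.1 then '?' else '-'])
  else (false, st.2 ++ [base])

def PropagateNoCoverageChar (seq : String) (LeftToRightDone : Bool) : String :=
  if LeftToRightDone then
    String.ofList (((seq.toList.reverse).foldl pyStep (false, ([] : List Char))).2.reverse)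
  else
    PropagateNoCoverageChar (String.ofList ((seq.toList.foldl pyStep (false, ([] : List Char))).2)) true
termination_by (if LeftToRightDone then 0 else 1)
decreasing_by simp_all

-- ===== PORT B =====
-- B's loop: state = (left, run, out); on a non-gap char (or the end) the buffered gap run is filled
def altLoop (flag : Bool) (left : Option Char) (run : Nat) (out : List Char) : List Char → List Char
  | [] =>
      if 0 < run then
        out ++ List.replicate run (if !flag && left == some '?' then '?' else '-')
      else out
  | c :: rest =>
      if c = '-' then altLoop flag left (run + 1) out rest
      else
        let out2 := if 0 < run then
            out ++ List.replicate run (if c == '?' || (!flag && left == some '?') then '?' else '-')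
          else out
        altLoop flag (some c) 0 (out2 ++ [c]) rest

def PropagateNoCoverageChar_alt (seq : String) (LeftToRightDone : Bool) : String :=
  String.ofList (altLoop LeftToRightDone none 0 [] seq.toList)

-- ===== PRECONDITION & SPEC =====
def Spec_PropagateNoCoverageChar (seq : String) (LeftToRightDone : Bool) (out : String) : Prop := out = PropagateNoCoverageChar_alt seq LeftToRightDone
instance (seq : String) (LeftToRightDone : Bool) (out : String) : Decidable (Spec_PropagateNoCoverageChar seq LeftToRightDone out) := by unfold Spec_PropagateNoCoverageChar; infer_instance

-- ===== CLAIM (what is proved, stated in full; the proofs are below) =====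
def Claim_equal_PropagateNoCoverageChar : Prop := ∀ (seq : String) (LeftToRightDone : Bool), Dom_PropagateNoCoverageChar seq LeftToRightDone → Spec_PropagateNoCoverageChar seq LeftToRightDone (PropagateNoCoverageChar seq LeftToRightDone)

-- ===== LEMMAS AND PROOFS =====

-- A's loop as a state-passing recursion producing the emitted characters only
def pyLoop (b : Bool) : List Char → List Char
  | [] => []
  | c :: r =>
      if c = '?' then '?' :: pyLoop true r
      else if c = '-' then (if b then '?' else '-') :: pyLoop b r
      else c :: pyLoop false r

-- the Boolean state of A's loop after consuming a list
def lastQ (b : Bool) : List Char → Bool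
  | [] => b
  | c :: r => lastQ (if c = '?' then true else if c = '-' then b else false) r

-- "the next non-gap character (if any) is '?'"
def nextIsQ : List Char → Bool
  | [] => false
  | c :: r => if c = '-' then nextIsQ r else decide (c = '?')

-- the result of A's reversed pass, read left-to-right: a gap fills iff the next non-gap is '?'
def Tfun : List Char → List Char
  | [] => []
  | c :: r => (if c = '-' then (if nextIsQ r then '?' else '-') else c) :: Tfun r

theorem foldl_pyStep (l : List Char) : ∀ (b : Bool) (acc : List Char),
    (l.foldl pyStep (b, acc)).2 = acc ++ pyLoop b l := by
  induction l with
  | nil => intro b acc; simp [pyLoop]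
  | cons c r ih =>
      intro b acc
      by_cases h1 : c = '?' <;> by_cases h2 : c = '-' <;>
        simp [pyStep, pyLoop, h1, h2, ih]

theorem pyLoop_append (xs ys : List Char) : ∀ b,
    pyLoop b (xs ++ ys) = pyLoop b xs ++ pyLoop (lastQ b xs) ys := by
  induction xs with
  | nil => intro b; simp [pyLoop, lastQ]
  | cons c r ih =>
      intro b
      by_cases h1 : c = '?' <;> by_cases h2 : c = '-' <;>
        simp [pyLoop, lastQ, h1, h2, ih]

theorem lastQ_append (xs : List Char) : ∀ (b : Bool) (c : Char),
    lastQ b (xs ++ [c]) = (if c = '?' then true else if c = '-' then lastQ b xs else false) := by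
  induction xs with
  | nil => intro b c; simp [lastQ]
  | cons d s ih => intro b c; simp [lastQ, ih]

theorem lastQ_rev (l : List Char) : lastQ false l.reverse = nextIsQ l := by
  induction l with
  | nil => simp [lastQ, nextIsQ]
  | cons c r ih =>
      by_cases h1 : c = '?' <;> by_cases h2 : c = '-' <;>
        simp [nextIsQ, lastQ_append, h1, h2, ih]

theorem rev_pyLoop_rev (l : List Char) : (pyLoop false l.reverse).reverse = Tfun l := by
  induction l with
  | nil => simp [pyLoop, Tfun]
  | cons c r ih =>
      have : pyLoop false (r.reverse ++ [c])
          = pyLoop false r.reverse ++ pyLoop (lastQ false r.reverse) [c] := pyLoop_append _ _ _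
      rw [List.reverse_cons, this, lastQ_rev]
      by_cases h1 : c = '?' <;> by_cases h2 : c = '-' <;>
        cases hq : nextIsQ r <;>
          simp [pyLoop, Tfun, h1, h2, hq, ih]

theorem nextIsQ_pyLoop (l : List Char) : nextIsQ (pyLoop false l) = nextIsQ l := by
  induction l with
  | nil => simp [pyLoop, nextIsQ]
  | cons c r ih =>
      by_cases h1 : c = '?' <;> by_cases h2 : c = '-' <;>
        simp [pyLoop, nextIsQ, h1, h2, ih]

theorem replicate_snoc_cons (n : Nat) (x : Char) (ys : List Char) :
    List.replicate n x ++ x :: ys = List.replicate (n + 1) x ++ ys := by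
  simp [List.replicate_succ']

theorem alt_true (l : List Char) : ∀ (left : Option Char) (run : Nat) (out : List Char),
    altLoop true left run out l
      = out ++ List.replicate run (if nextIsQ l then '?' else '-') ++ Tfun l := by
  induction l with
  | nil =>
      intro left run out
      cases run <;> simp [altLoop, nextIsQ, Tfun]
  | cons c r ih =>
      intro left run out
      by_cases h2 : c = '-'
      · rw [show altLoop true left run out (c :: r) = altLoop true left (run + 1) out r by
          simp [altLoop, h2]]
        rw [ih]
        subst h2
        cases hq : nextIsQ r <;>
          simp [nextIsQ, Tfun, hq, replicate_snoc_cons, List.append_assoc]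
      · rw [show altLoop true left run out (c :: r)
            = altLoop true (some c) 0
                ((if 0 < run then
                    out ++ List.replicate run (if c == '?' || (!true && left == some '?') then '?' else '-')
                  else out) ++ [c]) r by simp [altLoop, h2]]
        rw [ih]
        cases run <;>
          simp [nextIsQ, Tfun, h2, List.append_assoc]

theorem alt_false (l : List Char) : ∀ (left : Option Char) (run : Nat) (out : List Char),
    altLoop false left run out l
      = out ++ List.replicate run (if (left == some '?') || nextIsQ l then '?' else '-')
            ++ Tfun (pyLoop (left == some '?') l) := by
  induction l with
  | nil =>
      intro left run out
      cases run <;> simp [altLoop, nextIsQ, pyLoop, Tfun]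
  | cons c r ih =>
      intro left run out
      by_cases h2 : c = '-'
      · rw [show altLoop false left run out (c :: r) = altLoop false left (run + 1) out r by
          simp [altLoop, h2]]
        rw [ih]
        subst h2
        cases hb : (left == some '?')
        · cases hq : nextIsQ r <;>
            simp [nextIsQ, pyLoop, Tfun, hq, nextIsQ_pyLoop, replicate_snoc_cons,
              List.append_assoc]
        · simp [nextIsQ, pyLoop, Tfun, replicate_snoc_cons, List.append_assoc]
      · rw [show altLoop false left run out (c :: r)
            = altLoop false (some c) 0
                ((if 0 < run then
                    out ++ List.replicate run (if c == '?' || (!false && left == some '?') then '?' else '-')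
                  else out) ++ [c]) r by simp [altLoop, h2]]
        rw [ih]
        have hsome : (some c == some '?') = (c == '?') := rfl
        by_cases h1 : c = '?'
        · subst h1
          cases run <;>
            simp [nextIsQ, pyLoop, Tfun, List.append_assoc]
        · have hc : (c == '?') = false := by simp [h1]
          cases hb : (left == some '?') <;>
            cases run <;>
              simp [nextIsQ, pyLoop, Tfun, hsome, h1, h2, hc, List.append_assoc]

theorem A_true (s : String) :
    PropagateNoCoverageChar s true = String.ofList (Tfun s.toList) := by
  rw [PropagateNoCoverageChar, if_pos rfl, foldl_pyStep, List.nil_append, rev_pyLoop_rev]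

-- ===== VERDICT (by name: the statement is the Claim_ definition above) =====
theorem PropagateNoCoverageChar_spec : Claim_equal_PropagateNoCoverageChar := by
  intro seq flag _
  show PropagateNoCoverageChar seq flag = PropagateNoCoverageChar_alt seq flag
  cases flag
  · rw [PropagateNoCoverageChar, if_neg (by simp), foldl_pyStep, List.nil_append, A_true]
    unfold PropagateNoCoverageChar_alt
    rw [alt_false]
    simp [String.toList_ofList]
  · rw [A_true]
    unfold PropagateNoCoverageChar_alt
    rw [alt_true]
    simp
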